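-- pv_equiv track=rewrite | github.com/lolevone/QRtickets | cypher.py | get_gamma_filename
-- ===== SOURCE A (Python) =====
-- def get_gamma_filename(name: str) -> list:
--     """Returns a list of values for gamma encryption calculated using the filename."""
--     initial_key = 0
--     factor = 1
--     for symbol in name:
--         initial_key += ord(symbol)
--         factor *= ord(symbol)
--     module = factor + initial_key
--     return [initial_key, factor, module]
-- ===== SOURCE B (Python) =====
-- from collections import Counter
--
-- def get_gamma_filename(name: str) -> list:
--     """Returns a list of values for gamma encryption calculated using the filename."""
--     counts = Counter(name)
--     initial_key = sum(ord(c) * k for c, k in counts.items())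
--     factor = 1
--     for c, k in counts.items():
--         factor *= ord(c) ** k
--     module = factor + initial_key
--     return [initial_key, factor, module]
-- ===== Notes on version B (the rewrite author's own statement) =====
-- stated objective: alternative
-- what changed: B first builds a frequency table (collections.Counter) of the characters and then computes the sum as sum(ord(c)*k) and the product as a product of ord(c)**k over the distinct characters, instead of A's single fused per-character accumulator loop; correct because sum and product are commutative.
import Mathlib
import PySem

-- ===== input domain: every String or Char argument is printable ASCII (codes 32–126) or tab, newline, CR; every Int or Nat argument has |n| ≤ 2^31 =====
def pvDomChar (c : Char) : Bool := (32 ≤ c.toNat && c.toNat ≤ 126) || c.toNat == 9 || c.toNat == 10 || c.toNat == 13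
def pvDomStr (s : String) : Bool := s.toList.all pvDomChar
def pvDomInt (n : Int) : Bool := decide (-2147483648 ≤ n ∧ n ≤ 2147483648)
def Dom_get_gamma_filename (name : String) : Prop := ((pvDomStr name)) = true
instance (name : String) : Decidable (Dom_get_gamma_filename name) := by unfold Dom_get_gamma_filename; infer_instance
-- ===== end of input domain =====

-- B computes the sum and product of char codes by grouping: a Counter of the characters
-- first, then sum(ord(c)*k) and a product of ord(c)**k over distinct characters (alternative algorithm).

-- ===== PORT A =====
def get_gamma_filename (name : String) : List Int :=
  let st := name.toList.foldl
    (fun (st : Int × Int) symbol => (st.1 + (symbol.toNat : Int), st.2 * (symbol.toNat : Int)))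
    (0, 1)
  let module := st.2 + st.1
  [st.1, st.2, module]

-- ===== PORT B =====
def get_gamma_filename_alt (name : String) : List Int :=
  let counts : PySem.Dict Char Int := PySem.Dict.counter name.toList
  let initial_key : Int := (counts.items.map (fun p => (p.1.toNat : Int) * p.2)).sum
  let factor : Int := counts.items.foldl (fun acc p => acc * (p.1.toNat : Int) ^ p.2.toNat) 1
  let module := factor + initial_key
  [initial_key, factor, module]

-- ===== PRECONDITION & SPEC =====
def Spec_get_gamma_filename (name : String) (out : List Int) : Prop := out = get_gamma_filename_alt name
instance (name : String) (out : List Int) : Decidable (Spec_get_gamma_filename name out) := by unfold Spec_get_gamma_filename; infer_instance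

-- ===== CLAIM (what is proved, stated in full; the proofs are below) =====
def Claim_equal_get_gamma_filename : Prop := ∀ (name : String), Dom_get_gamma_filename name → Spec_get_gamma_filename name (get_gamma_filename name)

-- ===== LEMMAS AND PROOFS =====

theorem gamma_toFinset_dedup (l : List Char) : l.dedup.toFinset = l.toFinset := by
  ext a; simp

-- grouped reductions over the distinct characters equal the plain reductions over the list
theorem gamma_set_sum (l : List Char) :
    ((PySem.Set.ofList l).map (fun c => (c.toNat : Int) * (l.count c : Int))).sum
      = (l.map (fun c => (c.toNat : Int))).sum := by
  have hperm : (PySem.Set.ofList l).Perm l.dedup := by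
    rw [List.perm_ext_iff_of_nodup (PySem.Set.nodup_ofList l) l.nodup_dedup]
    intro a; simp [PySem.Set.mem_ofList, List.mem_dedup]
  calc ((PySem.Set.ofList l).map (fun c => (c.toNat : Int) * (l.count c : Int))).sum
      = (l.dedup.map (fun c => (c.toNat : Int) * (l.count c : Int))).sum :=
        (hperm.map _).sum_eq
    _ = l.toFinset.sum (fun c => l.count c • ((c.toNat : Int))) := by
        rw [← gamma_toFinset_dedup l, ← List.sum_toFinset _ l.nodup_dedup]
        exact Finset.sum_congr rfl (fun c _ => by rw [nsmul_eq_mul, mul_comm])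
    _ = (l.map (fun c => (c.toNat : Int))).sum := (Finset.sum_list_map_count l _).symm

theorem gamma_set_prod (l : List Char) :
    ((PySem.Set.ofList l).map (fun c => (c.toNat : Int) ^ l.count c)).prod
      = (l.map (fun c => (c.toNat : Int))).prod := by
  have hperm : (PySem.Set.ofList l).Perm l.dedup := by
    rw [List.perm_ext_iff_of_nodup (PySem.Set.nodup_ofList l) l.nodup_dedup]
    intro a; simp [PySem.Set.mem_ofList, List.mem_dedup]
  calc ((PySem.Set.ofList l).map (fun c => (c.toNat : Int) ^ l.count c)).prod
      = (l.dedup.map (fun c => (c.toNat : Int) ^ l.count c)).prod :=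
        (hperm.map _).prod_eq
    _ = l.toFinset.prod (fun c => ((c.toNat : Int)) ^ l.count c) := by
        rw [← gamma_toFinset_dedup l, ← List.prod_toFinset _ l.nodup_dedup]
    _ = (l.map (fun c => (c.toNat : Int))).prod := (Finset.prod_list_map_count l _).symm

-- A's fused loop is the pair (sum, prod) of the codes
theorem gamma_foldl_eq (l : List Char) (k f : Int) :
    l.foldl (fun (st : Int × Int) symbol => (st.1 + (symbol.toNat : Int), st.2 * (symbol.toNat : Int))) (k, f)
      = (k + (l.map (fun c => (c.toNat : Int))).sum, f * (l.map (fun c => (c.toNat : Int))).prod) := by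
  induction l generalizing k f with
  | nil => simp
  | cons c t ih => simp [List.foldl, ih, mul_assoc, add_assoc]

theorem gamma_fold_pow (l S : List Char) (a : Int) :
    S.foldl (fun acc c => acc * (c.toNat : Int) ^ l.count c) a
      = a * (S.map (fun c => (c.toNat : Int) ^ l.count c)).prod := by
  induction S generalizing a with
  | nil => simp
  | cons c t ih => simp [List.foldl, ih, mul_assoc]

-- ===== VERDICT (by name: the statement is the Claim_ definition above) =====
theorem get_gamma_filename_spec : Claim_equal_get_gamma_filename := by
  intro name _
  unfold Spec_get_gamma_filename get_gamma_filename get_gamma_filename_alt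
  rw [gamma_foldl_eq]
  simp only [PySem.Dict.items_counter, List.map_map, List.foldl_map, Function.comp_def,
    Int.toNat_natCast]
  rw [gamma_fold_pow, gamma_set_sum, gamma_set_prod, one_mul, zero_add]
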